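-- pv_equiv track=rewrite | github.com/soffiafdz/palimpsest | scripts/build_tag_mapping.py | has_meaningful_hyphen
-- ===== SOURCE A (Python) =====
-- MEANINGFUL_PREFIXES = (
--     "self-", "pre-", "anti-", "co-", "post-", "non-", "ex-",
--     "half-", "one-", "mid-", "over-", "under-", "cross-",
--     "long-", "short-", "multi-", "inter-", "re-", "two-",
--     "hyper-", "meta-", "neo-", "semi-", "sub-", "super-",
--     "trans-", "bi-", "tri-", "counter-",
-- )
--
-- MEANINGFUL_SUFFIXES = (
--     "-bound", "-like", "-based", "-driven", "-free", "-night",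
--     "-related", "-affirming", "-specific",
-- )
--
-- def has_meaningful_hyphen(word_lower: str) -> bool:
--     """
--     Check if a lowercased word contains a meaningful hyphen.
--
--     Meaningful hyphens are those in compound words where the hyphen
--     is part of the word's identity (e.g., self-harm, pre-transition).
--
--     Args:
--         word_lower: Lowercased word to check
--
--     Returns:
--         True if the word has a meaningful hyphen
--     """
--     for prefix in MEANINGFUL_PREFIXES:
--         if word_lower.startswith(prefix) and len(word_lower) > len(prefix):
--             return True
--     for suffix in MEANINGFUL_SUFFIXES:
--         if word_lower.endswith(suffix) and len(word_lower) > len(suffix):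
--             return True
--     return False
-- ===== SOURCE B (Python) =====
-- MEANINGFUL_PREFIXES = (
--     "self-", "pre-", "anti-", "co-", "post-", "non-", "ex-",
--     "half-", "one-", "mid-", "over-", "under-", "cross-",
--     "long-", "short-", "multi-", "inter-", "re-", "two-",
--     "hyper-", "meta-", "neo-", "semi-", "sub-", "super-",
--     "trans-", "bi-", "tri-", "counter-",
-- )
--
-- MEANINGFUL_SUFFIXES = (
--     "-bound", "-like", "-based", "-driven", "-free", "-night",
--     "-related", "-affirming", "-specific",
-- )
--
-- _PREFIX_SET = frozenset(MEANINGFUL_PREFIXES)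
-- _SUFFIX_SET = frozenset(MEANINGFUL_SUFFIXES)
--
--
-- def has_meaningful_hyphen(word_lower: str) -> bool:
--     """Check if a lowercased word contains a meaningful hyphen."""
--     i = word_lower.find("-")
--     if i == -1:
--         return False
--     j = word_lower.rfind("-")
--     n = len(word_lower)
--     return (word_lower[: i + 1] in _PREFIX_SET and i + 1 < n) or (
--         word_lower[j:] in _SUFFIX_SET and j > 0
--     )
-- ===== Notes on version B (the rewrite author's own statement) =====
-- stated objective: idiomatic
-- what changed: Instead of scanning all 29 prefixes and 9 suffixes with startswith/endswith, B extracts the slice up to the first hyphen and the slice from the last hyphen and tests each with one frozenset membership plus a non-empty remainder/head check.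
import Mathlib
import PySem

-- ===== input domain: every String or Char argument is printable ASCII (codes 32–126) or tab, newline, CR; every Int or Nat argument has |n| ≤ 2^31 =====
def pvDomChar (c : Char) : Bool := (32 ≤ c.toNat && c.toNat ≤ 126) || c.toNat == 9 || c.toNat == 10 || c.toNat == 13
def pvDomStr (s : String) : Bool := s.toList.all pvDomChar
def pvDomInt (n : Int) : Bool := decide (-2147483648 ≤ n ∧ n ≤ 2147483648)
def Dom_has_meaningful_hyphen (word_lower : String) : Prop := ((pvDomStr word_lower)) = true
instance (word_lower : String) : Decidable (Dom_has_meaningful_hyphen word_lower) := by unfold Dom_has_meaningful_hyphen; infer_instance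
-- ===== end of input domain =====

-- B replaces A's scan over all 29 prefixes / 9 suffixes by extracting the slice up to the
-- first hyphen and the slice from the last hyphen and testing each with one set membership
-- (objective: idiomatic; return value proved equal on all strings).

-- ===== PORT A =====
def pvMeaningfulPrefixes : List String :=
  ["self-", "pre-", "anti-", "co-", "post-", "non-", "ex-",
   "half-", "one-", "mid-", "over-", "under-", "cross-",
   "long-", "short-", "multi-", "inter-", "re-", "two-",
   "hyper-", "meta-", "neo-", "semi-", "sub-", "super-",
   "trans-", "bi-", "tri-", "counter-"]

def pvMeaningfulSuffixes : List String :=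
  ["-bound", "-like", "-based", "-driven", "-free", "-night",
   "-related", "-affirming", "-specific"]

-- for prefix in …: if word.startswith(prefix) and len(word) > len(prefix): return True  (twice), else False
def has_meaningful_hyphen (word_lower : String) : Bool :=
  if pvMeaningfulPrefixes.any (fun pfx =>
      PySem.Str.startswith word_lower pfx
        && decide (PySem.Str.len pfx < PySem.Str.len word_lower)) then
    true
  else if pvMeaningfulSuffixes.any (fun sfx =>
      PySem.Str.endswith word_lower sfx
        && decide (PySem.Str.len sfx < PySem.Str.len word_lower)) then
    true
  else
    false

-- ===== PORT B =====
def pvPrefixSet : PySem.Set String := PySem.Set.ofList pvMeaningfulPrefixes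
def pvSuffixSet : PySem.Set String := PySem.Set.ofList pvMeaningfulSuffixes

def has_meaningful_hyphen_alt (word_lower : String) : Bool :=
  let i := PySem.Str.find word_lower "-"
  if i = -1 then
    false
  else
    let j := PySem.Str.rfind word_lower "-"
    let n := PySem.Str.len word_lower
    (pvPrefixSet.contains (PySem.Str.slice word_lower none (some (i + 1)))
        && decide (i + 1 < n))
      || (pvSuffixSet.contains (PySem.Str.slice word_lower (some j) none)
        && decide (0 < j))

-- ===== PRECONDITION & SPEC =====
def Spec_has_meaningful_hyphen (word_lower : String) (out : Bool) : Prop := out = has_meaningful_hyphen_alt word_lower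
instance (word_lower : String) (out : Bool) : Decidable (Spec_has_meaningful_hyphen word_lower out) := by unfold Spec_has_meaningful_hyphen; infer_instance

-- ===== CLAIM (what is proved, stated in full; the proofs are below) =====
def Claim_equal_has_meaningful_hyphen : Prop := ∀ (word_lower : String), Dom_has_meaningful_hyphen word_lower → Spec_has_meaningful_hyphen word_lower (has_meaningful_hyphen word_lower)

-- ===== LEMMAS AND PROOFS =====

-- [a] is a prefix of l.drop i exactly when l[i]? = some a
theorem pv_singleton_prefix_drop (a : Char) (l : List Char) (i : Nat) :
    ([a] <+: l.drop i) ↔ l[i]? = some a := by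
  rw [← List.head?_drop]
  cases l.drop i with
  | nil => simp
  | cons x xs =>
    constructor
    · rintro ⟨t, ht⟩
      simp at ht
      simp [ht.1]
    · intro h
      simp at h
      exact ⟨xs, by simp [h]⟩

-- spec of rfind's downward scan
theorem pv_rfind_go_spec (s sub : List Char) (n : Nat) :
    (PySem.Chars.rfind.go s sub n = -1 ∧ ∀ j ≤ n, ¬ sub <+: s.drop j) ∨
    (∃ k : Nat, k ≤ n ∧ PySem.Chars.rfind.go s sub n = (k : Int) ∧ sub <+: s.drop k ∧
      ∀ j, k < j → j ≤ n → ¬ sub <+: s.drop j) := by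
  induction n with
  | zero =>
    by_cases h : sub <+: s
    · right
      exact ⟨0, le_refl _, by simp [PySem.Chars.rfind.go, List.isPrefixOf_iff_prefix, h], by simpa using h, by omega⟩
    · left
      refine ⟨by simp [PySem.Chars.rfind.go, List.isPrefixOf_iff_prefix, h], ?_⟩
      intro j hj
      interval_cases j
      simpa using h
  | succ m ih =>
    by_cases h : sub <+: s.drop (m + 1)
    · right
      refine ⟨m + 1, le_refl _, by simp [PySem.Chars.rfind.go, List.isPrefixOf_iff_prefix, h], h, ?_⟩
      intro j hj hj'
      omega
    · have hgo : PySem.Chars.rfind.go s sub (m + 1) = PySem.Chars.rfind.go s sub m := by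
        simp [PySem.Chars.rfind.go, List.isPrefixOf_iff_prefix, h]
      rcases ih with ⟨h1, h2⟩ | ⟨k, hk, he, hp, hmax⟩
      · left
        refine ⟨hgo ▸ h1, ?_⟩
        intro j hj
        rcases Nat.lt_or_ge j (m + 1) with hlt | hge
        · exact h2 j (by omega)
        · have : j = m + 1 := by omega
          exact this ▸ h
      · right
        refine ⟨k, by omega, hgo ▸ he, hp, ?_⟩
        intro j hj hj'
        rcases Nat.lt_or_ge j (m + 1) with hlt | hge
        · exact hmax j hj (by omega)
        · have : j = m + 1 := by omega
          exact this ▸ h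

theorem pv_rfind_spec (s sub : List Char) :
    (PySem.Chars.rfind s sub = -1 ∧ ∀ j ≤ s.length, ¬ sub <+: s.drop j) ∨
    (∃ k : Nat, k ≤ s.length ∧ PySem.Chars.rfind s sub = (k : Int) ∧ sub <+: s.drop k ∧
      ∀ j, k < j → j ≤ s.length → ¬ sub <+: s.drop j) :=
  pv_rfind_go_spec s sub s.length

-- every meaningful prefix (as chars) is nonempty, ends in '-', and has no earlier '-'
theorem pv_prefix_shape : ∀ p ∈ pvMeaningfulPrefixes.map String.toList,
    p ≠ [] ∧ p.getLast? = some '-' ∧ '-' ∉ p.dropLast := by decide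

-- every meaningful suffix (as chars) is nonempty, starts with '-', and has no later '-'
theorem pv_suffix_shape : ∀ s ∈ pvMeaningfulSuffixes.map String.toList,
    s ≠ [] ∧ s.head? = some '-' ∧ '-' ∉ s.tail := by decide

theorem pv_mem_toList_map (x : String) (l : List String) :
    x ∈ l ↔ x.toList ∈ l.map String.toList := by
  constructor
  · exact fun h => List.mem_map_of_mem h
  · intro h
    rcases List.mem_map.mp h with ⟨a, ha, he⟩
    rwa [← String.toList_inj.mp he]

-- if some entry of the word is '-', find ≠ -1
theorem pv_find_ne (l : List Char) (j : Nat) (h : l[j]? = some '-') :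
    PySem.Chars.find l ['-'] ≠ -1 := by
  rw [PySem.Chars.find_ne_neg_one_iff, List.singleton_infix_iff]
  exact List.mem_of_getElem? h

-- a matched meaningful prefix pins down the first hyphen
theorem pv_prefix_hyphens (p l : List Char) (hne : p ≠ []) (hlast : p.getLast? = some '-')
    (hnot : '-' ∉ p.dropLast) (hpre : p <+: l) :
    l[p.length - 1]? = some '-' ∧ ∀ i < p.length - 1, l[i]? ≠ some '-' := by
  have hlen : 0 < p.length := List.length_pos_iff.mpr hne
  have htake : p = l.take p.length := List.prefix_iff_eq_take.mp hpre
  have hsame : ∀ i < p.length, l[i]? = p[i]? := by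
    intro i hi
    conv_rhs => rw [htake]
    rw [List.getElem?_take, if_pos hi]
  constructor
  · rw [hsame (p.length - 1) (by omega), ← List.getLast?_eq_getElem?]
    exact hlast
  · intro i hi hcon
    rw [hsame i (by omega)] at hcon
    exact hnot (List.mem_of_getElem? (by rw [List.getElem?_dropLast, if_pos hi]; exact hcon))

-- a matched meaningful suffix pins down the last hyphen
theorem pv_suffix_hyphens (s l : List Char) (hhead : s.head? = some '-')
    (hnot : '-' ∉ s.tail) (hsuf : s <:+ l) :
    l[l.length - s.length]? = some '-' ∧
      ∀ j, l.length - s.length < j → j ≤ l.length → l[j]? ≠ some '-' := by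
  obtain ⟨u, hu⟩ := hsuf
  have hul : u.length + s.length = l.length := by rw [← hu]; simp
  have hm : l.length - s.length = u.length := by omega
  rw [hm]
  constructor
  · rw [← hu, List.getElem?_append_right (le_refl _), Nat.sub_self, ← List.head?_eq_getElem?]
    exact hhead
  · intro j hj hjle hcon
    rcases Nat.lt_or_ge j l.length with hjlt | hjge
    · rw [← hu, List.getElem?_append_right (by omega)] at hcon
      rw [show j - u.length = (j - u.length - 1) + 1 by omega, ← List.getElem?_tail] at hcon
      exact hnot (List.mem_of_getElem? hcon)
    · rw [List.getElem?_eq_none (by omega)] at hcon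
      simp at hcon

-- prefix side: A's scan hits some prefix iff the slice up to the first hyphen is in the set
theorem pv_pfx_iff (l : List Char) (hF0 : 0 ≤ PySem.Chars.find l ['-']) :
    (∃ p ∈ pvMeaningfulPrefixes.map String.toList, p <+: l ∧ p.length < l.length) ↔
      (l.take ((PySem.Chars.find l ['-']).toNat + 1) ∈ pvMeaningfulPrefixes.map String.toList ∧
        (PySem.Chars.find l ['-']).toNat + 1 < l.length) := by
  obtain ⟨hfp, hfm⟩ := PySem.Chars.find_spec hF0
  have hfe : l[(PySem.Chars.find l ['-']).toNat]? = some '-' :=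
    (pv_singleton_prefix_drop '-' l _).mp hfp
  have hfm' : ∀ i < (PySem.Chars.find l ['-']).toNat, l[i]? ≠ some '-' := by
    intro i hi hcon
    exact hfm i hi ((pv_singleton_prefix_drop '-' l i).mpr hcon)
  constructor
  · rintro ⟨p, hp, hpre, hlen⟩
    obtain ⟨hne, hlast, hnot⟩ := pv_prefix_shape p hp
    have hplen : 0 < p.length := List.length_pos_iff.mpr hne
    obtain ⟨h1, h2⟩ := pv_prefix_hyphens p l hne hlast hnot hpre
    have hFeq : (PySem.Chars.find l ['-']).toNat = p.length - 1 := by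
      rcases Nat.lt_trichotomy (PySem.Chars.find l ['-']).toNat (p.length - 1) with h | h | h
      · exact absurd hfe (h2 _ h)
      · exact h
      · exact absurd h1 (hfm' _ h)
    rw [hFeq, show p.length - 1 + 1 = p.length by omega, ← List.prefix_iff_eq_take.mp hpre]
    exact ⟨hp, by omega⟩
  · rintro ⟨hp, hlen⟩
    refine ⟨_, hp, List.take_prefix _ _, ?_⟩
    rw [List.length_take]
    omega

-- suffix side: A's scan hits some suffix iff the slice from the last hyphen is in the set
theorem pv_sfx_iff (l : List Char) (k : Nat) (hkle : k ≤ l.length)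
    (hkp : ['-'] <+: l.drop k)
    (hkmax : ∀ j, k < j → j ≤ l.length → ¬ ['-'] <+: l.drop j) :
    (∃ s ∈ pvMeaningfulSuffixes.map String.toList, s <:+ l ∧ s.length < l.length) ↔
      (l.drop k ∈ pvMeaningfulSuffixes.map String.toList ∧ 0 < k) := by
  have hke : l[k]? = some '-' := (pv_singleton_prefix_drop '-' l k).mp hkp
  obtain ⟨hklt, -⟩ := List.getElem?_eq_some_iff.mp hke
  have hkmax' : ∀ j, k < j → j ≤ l.length → l[j]? ≠ some '-' := by
    intro j h1 h2 hcon
    exact hkmax j h1 h2 ((pv_singleton_prefix_drop '-' l j).mpr hcon)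
  constructor
  · rintro ⟨s, hs, hsuf, hlen⟩
    obtain ⟨hne, hhead, hnot⟩ := pv_suffix_shape s hs
    have hslen : 0 < s.length := List.length_pos_iff.mpr hne
    obtain ⟨h1, h2⟩ := pv_suffix_hyphens s l hhead hnot hsuf
    have hkeq : k = l.length - s.length := by
      rcases Nat.lt_trichotomy k (l.length - s.length) with h | h | h
      · exact absurd h1 (hkmax' _ h (by omega))
      · exact h
      · exact absurd hke (h2 _ h (by omega))
    rw [hkeq, ← List.suffix_iff_eq_drop.mp hsuf]
    exact ⟨hs, by omega⟩
  · rintro ⟨hs, hk0⟩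
    refine ⟨_, hs, List.drop_suffix _ _, ?_⟩
    rw [List.length_drop]
    omega

-- what A computes, as a proposition about the character list
theorem pv_A_iff (w : String) :
    has_meaningful_hyphen w = true ↔
      (∃ p ∈ pvMeaningfulPrefixes.map String.toList, p <+: w.toList ∧ p.length < w.toList.length) ∨
      (∃ s ∈ pvMeaningfulSuffixes.map String.toList, s <:+ w.toList ∧ s.length < w.toList.length) := by
  unfold has_meaningful_hyphen
  have hP : pvMeaningfulPrefixes.any (fun pfx =>
      PySem.Str.startswith w pfx && decide (PySem.Str.len pfx < PySem.Str.len w)) = true ↔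
      ∃ p ∈ pvMeaningfulPrefixes.map String.toList, p <+: w.toList ∧ p.length < w.toList.length := by
    rw [List.any_eq_true]
    constructor
    · rintro ⟨p, hp, hc⟩
      simp only [Bool.and_eq_true, decide_eq_true_eq, PySem.Str.startswith_eq,
        PySem.Str.len_eq] at hc
      exact ⟨p.toList, List.mem_map_of_mem hp,
        (PySem.Chars.startswith_iff _ _).mp hc.1, by exact_mod_cast hc.2⟩
    · rintro ⟨p, hp, hpre, hlen⟩
      rcases List.mem_map.mp hp with ⟨a, ha, he⟩
      refine ⟨a, ha, ?_⟩
      rw [Bool.and_eq_true, decide_eq_true_eq, PySem.Str.startswith_eq,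
        PySem.Str.len_eq, PySem.Str.len_eq, he]
      exact ⟨(PySem.Chars.startswith_iff _ _).mpr hpre, by exact_mod_cast hlen⟩
  have hS : pvMeaningfulSuffixes.any (fun sfx =>
      PySem.Str.endswith w sfx && decide (PySem.Str.len sfx < PySem.Str.len w)) = true ↔
      ∃ s ∈ pvMeaningfulSuffixes.map String.toList, s <:+ w.toList ∧ s.length < w.toList.length := by
    rw [List.any_eq_true]
    constructor
    · rintro ⟨s, hs, hc⟩
      simp only [Bool.and_eq_true, decide_eq_true_eq, PySem.Str.endswith_eq,
        PySem.Str.len_eq] at hc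
      exact ⟨s.toList, List.mem_map_of_mem hs,
        (PySem.Chars.endswith_iff _ _).mp hc.1, by exact_mod_cast hc.2⟩
    · rintro ⟨s, hs, hsuf, hlen⟩
      rcases List.mem_map.mp hs with ⟨a, ha, he⟩
      refine ⟨a, ha, ?_⟩
      rw [Bool.and_eq_true, decide_eq_true_eq, PySem.Str.endswith_eq,
        PySem.Str.len_eq, PySem.Str.len_eq, he]
      exact ⟨(PySem.Chars.endswith_iff _ _).mpr hsuf, by exact_mod_cast hlen⟩
  split_ifs with h1 h2
  · simp only [true_iff]
    exact Or.inl (hP.mp h1)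
  · simp only [true_iff]
    exact Or.inr (hS.mp h2)
  · simp only [false_iff]
    rintro (h | h)
    · exact h1 (hP.mpr h)
    · exact h2 (hS.mpr h)

-- ===== VERDICT (by name: the statement is the Claim_ definition above) =====
theorem has_meaningful_hyphen_spec : Claim_equal_has_meaningful_hyphen := by
  intro w _
  unfold Spec_has_meaningful_hyphen
  rw [Bool.eq_iff_iff, pv_A_iff]
  have hdash : ("-" : String).toList = ['-'] := by decide
  by_cases hF : PySem.Chars.find w.toList ['-'] = -1
  · have hB : has_meaningful_hyphen_alt w = false := by
      simp [has_meaningful_hyphen_alt, PySem.Str.find_eq, hdash, hF]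
    rw [hB]
    simp only [Bool.false_eq_true, iff_false]
    rintro (⟨p, hp, hpre, hlen⟩ | ⟨s, hs, hsuf, hlen⟩)
    · obtain ⟨hne, hlast, hnot⟩ := pv_prefix_shape p hp
      obtain ⟨h1, -⟩ := pv_prefix_hyphens p w.toList hne hlast hnot hpre
      exact pv_find_ne w.toList _ h1 hF
    · obtain ⟨hne, hhead, hnot⟩ := pv_suffix_shape s hs
      obtain ⟨h1, -⟩ := pv_suffix_hyphens s w.toList hhead hnot hsuf
      exact pv_find_ne w.toList _ h1 hF
  · have hF0 : 0 ≤ PySem.Chars.find w.toList ['-'] := by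
      have := PySem.Chars.neg_one_le_find w.toList ['-']
      omega
    obtain ⟨hfp, hfm⟩ := PySem.Chars.find_spec hF0
    have hfe : w.toList[(PySem.Chars.find w.toList ['-']).toNat]? = some '-' :=
      (pv_singleton_prefix_drop '-' w.toList _).mp hfp
    obtain ⟨hFlt, -⟩ := List.getElem?_eq_some_iff.mp hfe
    rcases pv_rfind_spec w.toList ['-'] with ⟨-, h2⟩ | ⟨k, hkle, hRk, hkp, hkmax⟩
    · exact absurd hfp (h2 _ (by omega))
    · have hB : has_meaningful_hyphen_alt w = true ↔
          (w.toList.take ((PySem.Chars.find w.toList ['-']).toNat + 1) ∈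
              pvMeaningfulPrefixes.map String.toList ∧
            (PySem.Chars.find w.toList ['-']).toNat + 1 < w.toList.length) ∨
          (w.toList.drop k ∈ pvMeaningfulSuffixes.map String.toList ∧ 0 < k) := by
        have ht1 : (PySem.Str.slice w none (some (PySem.Chars.find w.toList ['-'] + 1))).toList =
            w.toList.take ((PySem.Chars.find w.toList ['-']).toNat + 1) := by
          rw [PySem.Str.toList_slice, PySem.Chars.slice_eq_listSlice,
            PySem.List.slice_to _ (by omega)]
          congr 1
          omega
        have ht2 : (PySem.Str.slice w (some ((k : Int))) none).toList = w.toList.drop k := by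
          rw [PySem.Str.toList_slice, PySem.Chars.slice_eq_listSlice,
            PySem.List.slice_from _ (by omega)]
          simp
        have hc1 : pvPrefixSet.contains
            (PySem.Str.slice w none (some (PySem.Chars.find w.toList ['-'] + 1))) = true ↔
            w.toList.take ((PySem.Chars.find w.toList ['-']).toNat + 1) ∈
              pvMeaningfulPrefixes.map String.toList := by
          rw [PySem.Set.contains_iff, pvPrefixSet, PySem.Set.mem_ofList,
            pv_mem_toList_map, ht1]
        have hc2 : pvSuffixSet.contains (PySem.Str.slice w (some ((k : Int))) none) = true ↔
            w.toList.drop k ∈ pvMeaningfulSuffixes.map String.toList := by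
          rw [PySem.Set.contains_iff, pvSuffixSet, PySem.Set.mem_ofList,
            pv_mem_toList_map, ht2]
        simp only [has_meaningful_hyphen_alt, PySem.Str.find_eq, PySem.Str.rfind_eq,
          PySem.Str.len_eq, hdash, hRk]
        rw [if_neg hF, Bool.or_eq_true, Bool.and_eq_true, Bool.and_eq_true,
          decide_eq_true_eq, decide_eq_true_eq, hc1, hc2]
        constructor
        · rintro (⟨ha, hb⟩ | ⟨ha, hb⟩)
          · exact Or.inl ⟨ha, by omega⟩
          · exact Or.inr ⟨ha, by exact_mod_cast hb⟩
        · rintro (⟨ha, hb⟩ | ⟨ha, hb⟩)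
          · exact Or.inl ⟨ha, by omega⟩
          · exact Or.inr ⟨ha, by exact_mod_cast hb⟩
      rw [hB]
      exact or_congr (pv_pfx_iff w.toList hF0) (pv_sfx_iff w.toList k hkle hkp hkmax)
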